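-- pv_equiv track=rewrite | github.com/miliar/Code_Jam_Webscraper | solutions_python/solutions_year17_round1_nr1/132.py | cake
-- ===== SOURCE A (Python) =====
-- def cake(matrix, x, y):
--     matrix = [list(item[0]) for item in matrix]
--     start = ['?']*x
--     for i in range(x):
--         for j in range(y):
--             if matrix[i][j] != '?' and start[i] == '?':
--                 start[i] = matrix[i][j]
--     blank = []
--     for i in range(x):
--         if matrix[i] == ['?']*y:
--             blank += [i]
--             continue
--         for j in range(y):
--             if matrix[i][j] == '?':
--                 matrix[i][j] = start[i]
--             else:
--                 start[i] = matrix[i][j]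
--     for i in range(x):
--         if i not in blank:
--             start_row = matrix[i]
--             break
--     for i in range(x):
--         if matrix[i] == ['?']*y:
--             matrix[i] = start_row
--         else:
--             start_row = matrix[i]
--     res = '\n'.join([''.join(item) for item in matrix])
--     return res
-- ===== SOURCE B (Python) =====
-- def fill_row(row, y):
--     # nearest-letter fill within the first y cells: carry letters rightward,
--     # then leftward so a blank prefix picks up the first letter
--     for j in range(1, y):
--         if row[j] == '?':
--             row[j] = row[j - 1]
--     for j in range(y - 2, -1, -1):
--         if row[j] == '?':
--             row[j] = row[j + 1]
--
--
-- def cake(matrix, x, y):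
--     grid = [list(item[0]) for item in matrix]
--     for i in range(x):
--         fill_row(grid[i], y)
--     for i in range(1, x):
--         if grid[i] == ['?'] * y:
--             grid[i] = grid[i - 1]
--     for i in range(x - 2, -1, -1):
--         if grid[i] == ['?'] * y:
--             grid[i] = grid[i + 1]
--     return '\n'.join(''.join(row) for row in grid)
-- ===== Notes on version B (the rewrite author's own statement) =====
-- stated objective: alternative
-- what changed: Replaces A's start-char array, blank-row index list and explicit first-non-blank-row search by four symmetric nearest-neighbour sweeps: per row a rightward then leftward carry over the first y cells, then over the rows a downward then upward carry copying still-blank rows from their neighbour.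
import Mathlib
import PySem

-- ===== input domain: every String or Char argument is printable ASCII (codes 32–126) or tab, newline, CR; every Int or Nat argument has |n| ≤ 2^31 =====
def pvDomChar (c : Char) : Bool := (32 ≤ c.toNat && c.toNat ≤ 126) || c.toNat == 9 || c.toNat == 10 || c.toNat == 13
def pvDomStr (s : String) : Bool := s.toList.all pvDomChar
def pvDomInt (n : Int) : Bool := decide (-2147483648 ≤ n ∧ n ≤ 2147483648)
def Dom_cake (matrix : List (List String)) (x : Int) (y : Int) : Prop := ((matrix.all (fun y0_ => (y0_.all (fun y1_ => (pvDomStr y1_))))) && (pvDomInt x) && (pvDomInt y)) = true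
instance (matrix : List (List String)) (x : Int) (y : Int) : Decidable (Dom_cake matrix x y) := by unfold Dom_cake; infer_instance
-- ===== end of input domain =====

-- B replaces A's start-char array, blank-row index list and first-non-blank-row search by four
-- symmetric nearest-neighbour sweeps (rightward/leftward per row, downward/upward over the rows);
-- return values only (neither version mutates its arguments observably).

-- shared by both ports: matrix = [list(item[0]) for item in matrix]
-- (item[0] on an empty item is an IndexError in Python; Pre_cake excludes empty items)
def rowsOf (matrix : List (List String)) : List (List Char) :=
  matrix.map (fun item => (item.headD "").toList)

-- ===== PORT A =====
-- Python A's loops touch start[i] / matrix[i] only during iteration i, so the index loops over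
-- range(x) are rendered as per-row maps/folds over the first x rows with the same inner loops.
def cake (matrix : List (List String)) (x : Int) (y : Int) : String :=
  let m0 := rowsOf matrix
  let xN := x.toNat
  let yN := y.toNat
  let top := m0.take xN
  -- first loop: start[i] = first non-'?' among matrix[i][0..y)
  let start := top.map (fun row =>
    (List.range yN).foldl (fun s j => if row.getD j '?' ≠ '?' ∧ s = '?' then row.getD j '?' else s) '?')
  -- second loop: record blank rows, horizontally fill the others in place
  let step2 := (top.zip start).map (fun p =>
    if p.1 = List.replicate yN '?' then (p.1, true)
    else (((List.range yN).foldl (fun (q : List Char × Char) j =>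
            if q.1.getD j '?' = '?' then (q.1.set j q.2, q.2) else (q.1, q.1.getD j '?'))
          (p.1, p.2)).1, false))
  let m2 := step2.map Prod.fst
  -- third loop: first row whose index is not in blank (Python raises NameError if none; Pre_cake excludes that)
  let startRow := match step2.find? (fun q => !q.2) with
    | some q => q.1
    | none => []
  -- fourth loop: replace blank rows by start_row, update start_row at non-blank rows
  let m3 := (m2.foldl (fun (acc : List (List Char) × List Char) r =>
      if r = List.replicate yN '?' then (acc.1 ++ [acc.2], acc.2) else (acc.1 ++ [r], r))
      ([], startRow)).1
  PySem.Str.join "\n" ((m3 ++ m0.drop xN).map (fun r => String.ofList r))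

-- ===== PORT B =====
-- fill_row: two index sweeps over the first y cells, rightward then leftward
def fillRowB (row : List Char) (y : Int) : List Char :=
  let r1 := (PySem.List.pyRange 1 y 1).foldl
    (fun r j => if r.getD j.toNat '?' = '?' then r.set j.toNat (r.getD (j.toNat - 1) '?') else r) row
  (PySem.List.pyRange (y - 2) (-1) (-1)).foldl
    (fun r j => if r.getD j.toNat '?' = '?' then r.set j.toNat (r.getD (j.toNat + 1) '?') else r) r1

def cake_alt (matrix : List (List String)) (x : Int) (y : Int) : String :=
  let grid := rowsOf matrix
  let g1 := (PySem.List.pyRange 0 x 1).foldl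
    (fun g i => g.set i.toNat (fillRowB (g.getD i.toNat []) y)) grid
  let g2 := (PySem.List.pyRange 1 x 1).foldl
    (fun g i => if g.getD i.toNat [] = List.replicate y.toNat '?' then g.set i.toNat (g.getD (i.toNat - 1) []) else g) g1
  let g3 := (PySem.List.pyRange (x - 2) (-1) (-1)).foldl
    (fun g i => if g.getD i.toNat [] = List.replicate y.toNat '?' then g.set i.toNat (g.getD (i.toNat + 1) []) else g) g2
  PySem.Str.join "\n" (g3.map (fun r => String.ofList r))

-- ===== PRECONDITION & SPEC =====
-- Pre_cake is exactly the set of inputs on which Python A returns: every item must be non-empty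
-- (item[0]), x ≤ len(matrix) and y within every inspected row (IndexError otherwise), and — when
-- 0 < x — some inspected row not entirely '?' (otherwise start_row is unassigned: NameError).
def Pre_cake (matrix : List (List String)) (x : Int) (y : Int) : Prop :=
  (∀ item ∈ matrix, item ≠ []) ∧ x ≤ (matrix.length : Int) ∧
  (∀ row ∈ (rowsOf matrix).take x.toNat, y.toNat ≤ row.length) ∧
  (0 < x → ∃ row ∈ (rowsOf matrix).take x.toNat, row ≠ List.replicate y.toNat '?')
instance (matrix : List (List String)) (x : Int) (y : Int) : Decidable (Pre_cake matrix x y) := by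
  unfold Pre_cake; infer_instance

def pvWitness_cake : List (List String) × Int × Int := ([["a?b"], ["??c"], ["???"]], 3, 3)

def Spec_cake (matrix : List (List String)) (x : Int) (y : Int) (out : String) : Prop := out = cake_alt matrix x y
instance (matrix : List (List String)) (x : Int) (y : Int) (out : String) : Decidable (Spec_cake matrix x y out) := by unfold Spec_cake; infer_instance

-- ===== CLAIM (what is proved, stated in full; the proofs are below) =====
def Claim_equal_cake : Prop := ∀ (matrix : List (List String)) (x : Int) (y : Int), Dom_cake matrix x y → Pre_cake matrix x y → Spec_cake matrix x y (cake matrix x y)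

-- ===== LEMMAS AND PROOFS =====

-- generic one-directional carry fill: cells equal to the blank b take the running carry,
-- other cells update the carry
def hfillG {α : Type} [DecidableEq α] (b : α) : α → List α → List α
  | _, [] => []
  | c, a :: t => if a = b then c :: hfillG b c t else a :: hfillG b a t

def lastG {α : Type} [DecidableEq α] (b : α) (s : α) (l : List α) : α :=
  l.foldl (fun c a => if a = b then c else a) s

-- forward sweep then backward sweep
def smearG {α : Type} [DecidableEq α] (b : α) (l : List α) : List α :=
  (hfillG b b ((hfillG b b l).reverse)).reverse

def fillRow (yN : Nat) (row : List Char) : List Char :=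
  match (row.take yN).find? (fun c => c ≠ '?') with
  | none => row
  | some f => hfillG '?' f (row.take yN) ++ row.drop yN

theorem hfillG_length {α : Type} [DecidableEq α] (b c : α) (l : List α) :
    (hfillG b c l).length = l.length := by
  induction l generalizing c with
  | nil => rfl
  | cons a t ih => simp only [hfillG]; split <;> simp [ih]

theorem lastG_cons {α : Type} [DecidableEq α] (b s a : α) (t : List α) :
    lastG b s (a :: t) = lastG b (if a = b then s else a) t := by
  simp only [lastG, List.foldl_cons]

theorem hfillG_append {α : Type} [DecidableEq α] (b c : α) (l₁ l₂ : List α) :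
    hfillG b c (l₁ ++ l₂) = hfillG b c l₁ ++ hfillG b (lastG b c l₁) l₂ := by
  induction l₁ generalizing c with
  | nil => simp [hfillG, lastG]
  | cons a t ih =>
    simp only [List.cons_append, hfillG, lastG_cons]
    by_cases h : a = b <;> simp [h, ih]

theorem hfillG_singleton {α : Type} [DecidableEq α] (b c a : α) :
    hfillG b c [a] = [if a = b then c else a] := by
  simp only [hfillG]; split <;> rfl

theorem hfillG_cons_self {α : Type} [DecidableEq α] (b a : α) (t : List α) :
    hfillG b b (a :: t) = a :: hfillG b a t := by
  simp only [hfillG]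
  split
  · next h => rw [h]
  · rfl

theorem hfillG_rep {α : Type} [DecidableEq α] (b c : α) (k : Nat) :
    hfillG b c (List.replicate k b) = List.replicate k c := by
  induction k generalizing c with
  | zero => rfl
  | succ m ih => simp [List.replicate_succ, hfillG, ih]

theorem lastG_rep {α : Type} [DecidableEq α] (b c : α) (k : Nat) :
    lastG b c (List.replicate k b) = c := by
  induction k with
  | zero => rfl
  | succ m ih => simp [List.replicate_succ, lastG_cons, ih]

theorem hfillG_all_b {α : Type} [DecidableEq α] (b : α) (l : List α) (h : ∀ a ∈ l, a = b) :
    hfillG b b l = l := by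
  conv_lhs => rw [List.eq_replicate_of_mem h]
  rw [hfillG_rep]
  exact (List.eq_replicate_of_mem h).symm

theorem hfillG_ne_b {α : Type} [DecidableEq α] (b c : α) (l : List α) (hc : c ≠ b) :
    ∀ a ∈ hfillG b c l, a ≠ b := by
  induction l generalizing c with
  | nil => simp [hfillG]
  | cons a t ih =>
    simp only [hfillG]
    split
    · simpa using ⟨hc, ih c hc⟩
    · next h => simpa using ⟨h, ih a h⟩

theorem hfillG_no_b {α : Type} [DecidableEq α] (b c : α) (l : List α) (h : ∀ a ∈ l, a ≠ b) :
    hfillG b c l = l := by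
  induction l generalizing c with
  | nil => rfl
  | cons a t ih =>
    have ha := h a (by simp)
    simp only [hfillG, if_neg ha]
    rw [ih a (fun x hx => h x (by simp [hx]))]

theorem hfillG_last {α : Type} [DecidableEq α] (b d c : α) (l : List α) (h : l ≠ []) :
    (hfillG b c l).getD (l.length - 1) d = lastG b c l := by
  induction l generalizing c with
  | nil => exact absurd rfl h
  | cons a t ih =>
    rw [lastG_cons]
    cases t with
    | nil => simp only [hfillG, lastG]; split <;> simp
    | cons x u =>
      have ht : (x :: u) ≠ [] := by simp
      simp only [hfillG]
      split
      · simpa [List.length_cons] using ih c ht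
      · next ha => simpa [List.length_cons] using ih a ht

theorem smearG_all {α : Type} [DecidableEq α] (b : α) (l : List α) (h : ∀ a ∈ l, a = b) :
    smearG b l = l := by
  rw [smearG, hfillG_all_b b l h, hfillG_all_b b l.reverse (fun a ha => h a (List.mem_reverse.mp ha)),
    List.reverse_reverse]

theorem smearG_decomp {α : Type} [DecidableEq α] (b f : α) (k : Nat) (R : List α) (hf : f ≠ b) :
    smearG b (List.replicate k b ++ f :: R) = List.replicate k f ++ f :: hfillG b f R := by
  have h1 : hfillG b b (List.replicate k b ++ f :: R)
      = List.replicate k b ++ f :: hfillG b f R := by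
    rw [hfillG_append, hfillG_rep, lastG_rep]
    simp [hfillG, if_neg hf]
  rw [smearG, h1]
  have h2 : (List.replicate k b ++ f :: hfillG b f R).reverse
      = (hfillG b f R).reverse ++ f :: List.replicate k b := by
    simp [List.reverse_append]
  rw [h2, hfillG_append,
    hfillG_no_b b b _ (fun a ha => hfillG_ne_b b f R hf a (List.mem_reverse.mp ha))]
  have h3 : hfillG b (lastG b b (hfillG b f R).reverse) (f :: List.replicate k b)
      = f :: List.replicate k f := by
    simp [hfillG, if_neg hf, hfillG_rep]
  rw [h3]
  simp [List.reverse_append]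

theorem find?_decomp {α : Type} [DecidableEq α] (b : α) (l : List α) (f : α)
    (h : l.find? (fun a => a ≠ b) = some f) :
    f ≠ b ∧ ∃ k R, l = List.replicate k b ++ f :: R := by
  induction l with
  | nil => simp at h
  | cons a t ih =>
    by_cases ha : a = b
    · rw [List.find?_cons_of_neg (by simp [ha])] at h
      obtain ⟨hf, k, R, hl⟩ := ih h
      exact ⟨hf, k + 1, R, by rw [List.replicate_succ, ha]; simp [hl]⟩
    · rw [List.find?_cons_of_pos (by simpa using ha)] at h
      injection h with h'
      exact ⟨h' ▸ ha, 0, t, by simp [h']⟩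

-- pyRange endpoints may be clamped to toNat (the range is empty on both sides otherwise)
theorem pyR_zero (x : Int) :
    PySem.List.pyRange 0 x 1 = PySem.List.pyRange 0 (x.toNat : Int) 1 := by
  by_cases h : 0 ≤ x
  · rw [Int.toNat_of_nonneg h]
  · rw [PySem.List.pyRange_one_eq_nil (by omega), PySem.List.pyRange_one_eq_nil (by omega)]

theorem pyR_one (x : Int) :
    PySem.List.pyRange 1 x 1 = PySem.List.pyRange 1 (x.toNat : Int) 1 := by
  by_cases h : 0 ≤ x
  · rw [Int.toNat_of_nonneg h]
  · rw [PySem.List.pyRange_one_eq_nil (by omega), PySem.List.pyRange_one_eq_nil (by omega)]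

theorem pyR_neg (x : Int) :
    PySem.List.pyRange (x - 2) (-1) (-1) = PySem.List.pyRange ((x.toNat : Int) - 2) (-1) (-1) := by
  by_cases h : 0 ≤ x
  · rw [Int.toNat_of_nonneg h]
  · rw [PySem.List.pyRange_neg_one_eq_nil (by omega), PySem.List.pyRange_neg_one_eq_nil (by omega)]

-- the horizontal per-row loop of B's cake: grid[i] is rewritten in place for i in range(x)
theorem set_loop (y : Int) :
    ∀ (n : Nat) (g : List (List Char)), n ≤ g.length →
      (PySem.List.pyRange 0 (n : Int) 1).foldl
        (fun g i => g.set i.toNat (fillRowB (g.getD i.toNat []) y)) g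
      = (g.take n).map (fun r => fillRowB r y) ++ g.drop n := by
  intro n
  induction n with
  | zero => intro g _; rw [PySem.List.pyRange_one_eq_nil (by norm_num)]; simp
  | succ m ih =>
    intro g h
    have hm : m < g.length := by omega
    have hsplit : PySem.List.pyRange 0 ((m + 1 : Nat) : Int) 1
        = PySem.List.pyRange 0 (m : Int) 1 ++ [(m : Int)] := by
      push_cast
      exact PySem.List.pyRange_one_succ_right (by positivity)
    rw [hsplit, List.foldl_append, ih g (by omega)]
    simp only [List.foldl_cons, List.foldl_nil, Int.toNat_natCast]
    have hlen : ((g.take m).map (fun r => fillRowB r y)).length = m := by simp; omega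
    have hdrop : g.drop m = g[m] :: g.drop (m + 1) := List.drop_eq_getElem_cons hm
    have hget : ((g.take m).map (fun r => fillRowB r y) ++ g.drop m).getD m [] = g[m] := by
      rw [List.getD_append_right _ _ _ _ (le_of_eq hlen), hlen, Nat.sub_self, hdrop]
      rfl
    rw [hget, List.set_append, if_neg (by omega), hlen, Nat.sub_self, hdrop, List.set_cons_zero]
    have htake : g.take (m + 1) = g.take m ++ [g[m]] := by
      rw [List.take_add_one, List.getElem?_eq_getElem hm]; rfl
    rw [htake, List.map_append, List.append_assoc]
    rfl

-- B's forward sweeps (indices 1..n-1, each blank cell copies its predecessor) are the carry fill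
theorem fwd_loop {α : Type} [DecidableEq α] (b d : α) :
    ∀ (n : Nat) (g : List α), n ≤ g.length →
      (PySem.List.pyRange 1 (n : Int) 1).foldl
        (fun r j => if r.getD j.toNat d = b then r.set j.toNat (r.getD (j.toNat - 1) d) else r) g
      = hfillG b b (g.take n) ++ g.drop n := by
  intro n
  induction n with
  | zero => intro g _; rw [PySem.List.pyRange_one_eq_nil (by norm_num)]; simp [hfillG]
  | succ m ih =>
    intro g h
    rcases Nat.eq_zero_or_pos m with hm0 | hm1
    · subst hm0
      rw [PySem.List.pyRange_one_eq_nil (by norm_num)]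
      cases g with
      | nil => simp at h
      | cons a t => simp [hfillG_cons_self, hfillG]
    · have hm : m < g.length := by omega
      have hsplit : PySem.List.pyRange 1 ((m + 1 : Nat) : Int) 1
          = PySem.List.pyRange 1 (m : Int) 1 ++ [(m : Int)] := by
        push_cast
        exact PySem.List.pyRange_one_succ_right (by exact_mod_cast hm1)
      rw [hsplit, List.foldl_append, ih g (by omega)]
      simp only [List.foldl_cons, List.foldl_nil, Int.toNat_natCast]
      have hlen : (hfillG b b (g.take m)).length = m := by
        rw [hfillG_length, List.length_take]; omega
      have hdrop : g.drop m = g[m] :: g.drop (m + 1) := List.drop_eq_getElem_cons hm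
      have hget : (hfillG b b (g.take m) ++ g.drop m).getD m d = g[m] := by
        rw [List.getD_append_right _ _ _ _ (le_of_eq hlen), hlen, Nat.sub_self, hdrop]
        rfl
      have htake : g.take (m + 1) = g.take m ++ [g[m]] := by
        rw [List.take_add_one, List.getElem?_eq_getElem hm]; rfl
      have htfill : hfillG b b (g.take (m + 1))
          = hfillG b b (g.take m) ++ [if g[m] = b then lastG b b (g.take m) else g[m]] := by
        rw [htake, hfillG_append, hfillG_singleton]
      rw [hget]
      by_cases hb : g[m] = b
      · rw [if_pos hb]
        have hne : g.take m ≠ [] := by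
          have hl : (g.take m).length = m := by rw [List.length_take]; omega
          intro h0
          rw [h0] at hl
          simp at hl
          omega
        have hgetprev : (hfillG b b (g.take m) ++ g.drop m).getD (m - 1) d
            = lastG b b (g.take m) := by
          have hlt1 : m - 1 < (hfillG b b (g.take m)).length := by rw [hlen]; omega
          rw [List.getD_append _ _ _ _ hlt1]
          have hlt : (g.take m).length - 1 = m - 1 := by rw [List.length_take]; omega
          rw [← hlt, hfillG_last b d b (g.take m) hne]
        rw [hgetprev, List.set_append,
          if_neg (show ¬ m < (hfillG b b (g.take m)).length by rw [hlen]; omega), hlen,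
          Nat.sub_self, hdrop, List.set_cons_zero, htfill, if_pos hb]
        simp
      · rw [if_neg hb, htfill, if_neg hb, hdrop]
        simp

-- B's backward sweeps (indices n-2..0, each blank cell copies its successor) are the
-- reversed carry fill
theorem bwd_loop {α : Type} [DecidableEq α] (b d : α) :
    ∀ (n : Nat) (g : List α), n ≤ g.length →
      (PySem.List.pyRange ((n : Int) - 2) (-1) (-1)).foldl
        (fun r j => if r.getD j.toNat d = b then r.set j.toNat (r.getD (j.toNat + 1) d) else r) g
      = (hfillG b b ((g.take n).reverse)).reverse ++ g.drop n := by
  intro n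
  induction n with
  | zero => intro g _; rw [PySem.List.pyRange_neg_one_eq_nil (by norm_num)]; simp [hfillG]
  | succ m ih =>
    intro g h
    rcases Nat.eq_zero_or_pos m with hm0 | hm1
    · subst hm0
      rw [PySem.List.pyRange_neg_one_eq_nil (by norm_num)]
      cases g with
      | nil => simp at h
      | cons a t => simp [hfillG_cons_self, hfillG]
    · obtain ⟨k, rfl⟩ : ∃ k, m = k + 1 := ⟨m - 1, by omega⟩
      have hk1 : k + 1 < g.length := by omega
      have hk : k < g.length := by omega
      have hsplit : PySem.List.pyRange (((k + 2 : Nat) : Int) - 2) (-1) (-1)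
          = ((k : Int)) :: PySem.List.pyRange (((k + 1 : Nat) : Int) - 2) (-1) (-1) := by
        push_cast
        rw [show (k : Int) + 2 - 2 = (k : Int) by ring, show (k : Int) + 1 - 2 = (k : Int) - 1 by ring]
        exact PySem.List.pyRange_neg_one_cons (by omega)
      rw [hsplit, List.foldl_cons]
      simp only [Int.toNat_natCast]
      have hgk : g.getD k d = g[k] := by
        rw [List.getD_eq_getElem?_getD, List.getElem?_eq_getElem hk]; rfl
      have hgk1 : g.getD (k + 1) d = g[k + 1] := by
        rw [List.getD_eq_getElem?_getD, List.getElem?_eq_getElem hk1]; rfl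
      rw [hgk, hgk1]
      set v := if g[k] = b then g[k + 1] else g[k] with hv
      set g' := if g[k] = b then g.set k g[k + 1] else g with hg'
      have hg'len : (k + 1 : Nat) ≤ g'.length := by
        rw [hg']
        split
        · simpa using Nat.le_of_lt hk1
        · omega
      rw [ih g' hg'len]
      -- take/drop of the modified list
      have htake1 : g.take (k + 1) = g.take k ++ [g[k]] := by
        rw [List.take_add_one, List.getElem?_eq_getElem hk]; rfl
      have htake2 : g.take (k + 2) = g.take k ++ [g[k]] ++ [g[k + 1]] := by
        rw [show k + 2 = (k + 1) + 1 by ring, List.take_add_one,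
          List.getElem?_eq_getElem hk1, htake1]; rfl
      have hg'take : g'.take (k + 1) = g.take k ++ [v] := by
        rw [hg', hv]
        split
        · rw [List.take_set, htake1, List.set_append, if_neg (by rw [List.length_take]; omega)]
          have : k - (g.take k).length = 0 := by rw [List.length_take]; omega
          rw [this, List.set_cons_zero]
        · exact htake1
      have hg'drop : g'.drop (k + 1) = g[k + 1] :: g.drop (k + 2) := by
        have : g'.drop (k + 1) = g.drop (k + 1) := by
          rw [hg']; split
          · exact List.drop_set_of_lt (by omega)
          · rfl
        rw [this, List.drop_eq_getElem_cons hk1]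
      rw [hg'take, hg'drop, htake2]
      -- both sides as explicit reverses of carry fills
      have hrev1 : (g.take k ++ [v]).reverse = v :: (g.take k).reverse := by simp
      have hrev2 : (g.take k ++ [g[k]] ++ [g[k + 1]]).reverse
          = g[k + 1] :: g[k] :: (g.take k).reverse := by simp
      rw [hrev1, hrev2, hfillG_cons_self, hfillG_cons_self]
      have hrhs : hfillG b (g[k + 1]) (g[k] :: (g.take k).reverse)
          = (if g[k] = b then g[k + 1] :: hfillG b (g[k + 1]) (g.take k).reverse
             else g[k] :: hfillG b (g[k]) (g.take k).reverse) := by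
        simp only [hfillG]
      rw [hrhs, hv]
      by_cases hb : g[k] = b <;> simp [hb]

-- fill_row equals the functional per-row fill
theorem fillRowB_eq (row : List Char) (y : Int) (h : y.toNat ≤ row.length) :
    fillRowB row y = smearG '?' (row.take y.toNat) ++ row.drop y.toNat := by
  unfold fillRowB
  rw [pyR_one y, fwd_loop '?' '?' y.toNat row h, pyR_neg y]
  have hlen1 : (hfillG '?' '?' (row.take y.toNat)).length = y.toNat := by
    rw [hfillG_length, List.length_take]; omega
  have hslen : y.toNat ≤ (hfillG '?' '?' (row.take y.toNat) ++ row.drop y.toNat).length := by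
    simp [hlen1]
  rw [bwd_loop '?' '?' y.toNat _ hslen, List.take_left' hlen1, List.drop_left' hlen1, smearG]

theorem smear_fillRow (yN : Nat) (row : List Char) :
    smearG '?' (row.take yN) ++ row.drop yN = fillRow yN row := by
  cases hf : (row.take yN).find? (fun c => c ≠ '?') with
  | none =>
    have hall : ∀ a ∈ row.take yN, a = '?' := fun a ha => by
      simpa using List.find?_eq_none.mp hf a ha
    unfold fillRow
    rw [hf, smearG_all _ _ hall, List.take_append_drop]
  | some f =>
    obtain ⟨hfb, k, R, hP⟩ := find?_decomp '?' (row.take yN) f hf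
    unfold fillRow
    rw [hf]
    show smearG '?' (row.take yN) ++ row.drop yN = hfillG '?' f (row.take yN) ++ row.drop yN
    rw [hP, smearG_decomp _ _ _ _ hfb, hfillG_append, hfillG_rep, lastG_rep]
    simp [hfillG]

-- B's whole pipeline, characterised on the first x rows
theorem cake_alt_eq (matrix : List (List String)) (x : Int) (y : Int)
    (hx : x.toNat ≤ (rowsOf matrix).length)
    (hy : ∀ r ∈ (rowsOf matrix).take x.toNat, y.toNat ≤ r.length) :
    cake_alt matrix x y = PySem.Str.join "\n"
      ((smearG (List.replicate y.toNat '?') (((rowsOf matrix).take x.toNat).map (fillRow y.toNat))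
        ++ (rowsOf matrix).drop x.toNat).map (fun r => String.ofList r)) := by
  simp only [cake_alt]
  rw [pyR_zero x, set_loop y x.toNat (rowsOf matrix) hx]
  have hmap : ((rowsOf matrix).take x.toNat).map (fun r => fillRowB r y)
      = ((rowsOf matrix).take x.toNat).map (fillRow y.toNat) :=
    List.map_congr_left (fun r hr => by
      rw [fillRowB_eq r y (hy r hr), smear_fillRow])
  rw [hmap]
  set T := ((rowsOf matrix).take x.toNat).map (fillRow y.toNat) with hT
  set D := (rowsOf matrix).drop x.toNat with hD
  have hTlen : T.length = x.toNat := by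
    rw [hT, List.length_map, List.length_take]; omega
  set blank := List.replicate y.toNat '?' with hblank
  have h1 : x.toNat ≤ (T ++ D).length := by simp [hTlen]
  rw [pyR_one x, fwd_loop blank [] x.toNat (T ++ D) h1, List.take_left' hTlen, List.drop_left' hTlen]
  have h2 : x.toNat ≤ (hfillG blank blank T ++ D).length := by
    simp [hfillG_length, hTlen]
  have h3 : (hfillG blank blank T).length = x.toNat := by rw [hfillG_length, hTlen]
  rw [pyR_neg x, bwd_loop blank [] x.toNat _ h2, List.take_left' h3, List.drop_left' h3, smearG]

-- ===== A-side characterisation (ported from the index loops of Python A) =====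

theorem foldl_range_getD {α β : Type} (f : β → α → β) (d : α) :
    ∀ (n : Nat) (l : List α) (b : β), n ≤ l.length →
      (List.range n).foldl (fun s j => f s (l.getD j d)) b = (l.take n).foldl f b := by
  intro n
  induction n with
  | zero => simp
  | succ m ih =>
    intro l b h
    have hm : m < l.length := Nat.lt_of_succ_le h
    rw [List.range_succ, List.foldl_append, ih l b (Nat.le_of_lt hm)]
    rw [List.take_add_one, List.getElem?_eq_getElem hm]
    simp only [Option.toList_some, List.foldl_append, List.foldl_cons, List.foldl_nil]
    rw [List.getD_eq_getElem?_getD, List.getElem?_eq_getElem hm]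
    rfl

-- A's in-place horizontal fill loop, characterised
theorem A_inner (n : Nat) (row : List Char) (s : Char) (h : n ≤ row.length) :
    (List.range n).foldl (fun (q : List Char × Char) j =>
        if q.1.getD j '?' = '?' then (q.1.set j q.2, q.2) else (q.1, q.1.getD j '?'))
      (row, s) = (hfillG '?' s (row.take n) ++ row.drop n, lastG '?' s (row.take n)) := by
  induction n with
  | zero => simp [hfillG, lastG]
  | succ m ih =>
    have hm : m < row.length := Nat.lt_of_succ_le h
    rw [List.range_succ, List.foldl_append, ih (Nat.le_of_lt hm)]
    have hlen : (hfillG '?' s (row.take m)).length = m := by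
      rw [hfillG_length, List.length_take]; omega
    have hdrop : row.drop m = row[m] :: row.drop (m + 1) := List.drop_eq_getElem_cons hm
    have hget : (hfillG '?' s (row.take m) ++ row.drop m).getD m '?' = row[m] := by
      rw [List.getD_append_right _ _ _ _ (le_of_eq hlen), hlen, Nat.sub_self, hdrop]
      rfl
    have htake : row.take (m + 1) = row.take m ++ [row[m]] := by
      rw [List.take_add_one, List.getElem?_eq_getElem hm]; rfl
    have hlast : lastG '?' s (row.take (m + 1)) =
        if row[m] = '?' then lastG '?' s (row.take m) else row[m] := by
      rw [htake]; unfold lastG; rw [List.foldl_append]; simp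
    simp only [List.foldl_cons, List.foldl_nil, hget]
    by_cases hq : row[m] = '?'
    · rw [if_pos hq]
      have hset : (hfillG '?' s (row.take m) ++ row.drop m).set m (lastG '?' s (row.take m)) =
          hfillG '?' s (row.take (m + 1)) ++ row.drop (m + 1) := by
        rw [List.set_append, if_neg (by omega), hlen, Nat.sub_self, hdrop, List.set_cons_zero,
          htake, hfillG_append, hfillG_singleton, if_pos hq]
        simp
      rw [hset, hlast, if_pos hq]
    · rw [if_neg hq, hlast, if_neg hq, htake, hfillG_append, hfillG_singleton, if_neg hq, hdrop]
      simp

-- A's first pass computes the first non-'?' of the first y cells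
theorem fg_stable (l : List Char) (s : Char) (hs : s ≠ '?') :
    l.foldl (fun s a => if a ≠ '?' ∧ s = '?' then a else s) s = s := by
  induction l with
  | nil => rfl
  | cons a t ih => simpa [hs] using ih

theorem fg_firstL (l : List Char) :
    l.foldl (fun s a => if a ≠ '?' ∧ s = '?' then a else s) '?' =
      (match l.find? (fun c => c ≠ '?') with | some f => f | none => '?') := by
  induction l with
  | nil => rfl
  | cons a t ih =>
    by_cases ha : a = '?'
    · simp [ha, ih]
    · simp [ha, fg_stable t a ha]

theorem rowA_eq (yN : Nat) (row : List Char) :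
    hfillG '?' (match (row.take yN).find? (fun c => c ≠ '?') with | some f => f | none => '?')
        (row.take yN) ++ row.drop yN = fillRow yN row := by
  cases hf : (row.take yN).find? (fun c => c ≠ '?') with
  | none =>
    have hall : ∀ a ∈ row.take yN, a = '?' := by
      intro a ha
      have := List.find?_eq_none.mp hf a ha
      simpa using this
    unfold fillRow
    rw [hf, hfillG_all_b _ _ hall, List.take_append_drop]
  | some f => unfold fillRow; rw [hf]

theorem fillRow_rep (yN : Nat) : fillRow yN (List.replicate yN '?') = List.replicate yN '?' := by
  have hpre : (List.replicate yN '?').take yN = List.replicate yN '?' := by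
    simp [List.take_replicate]
  have hnone : ((List.replicate yN '?').take yN).find? (fun c => c ≠ '?') = none := by
    rw [hpre, List.find?_eq_none]
    intro a ha
    simp [List.eq_of_mem_replicate ha]
  unfold fillRow
  rw [hnone]

theorem fillRow_ne_rep (yN : Nat) (row : List Char) (h : yN ≤ row.length)
    (hne : row ≠ List.replicate yN '?') : fillRow yN row ≠ List.replicate yN '?' := by
  cases hf : (row.take yN).find? (fun c => c ≠ '?') with
  | none => unfold fillRow; rw [hf]; exact hne
  | some f =>
    unfold fillRow
    rw [hf]
    show hfillG '?' f (row.take yN) ++ row.drop yN ≠ List.replicate yN '?'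
    have hfm := List.find?_some hf
    have hfmem := List.mem_of_find?_eq_some hf
    have hfq : f ≠ '?' := by simpa using hfm
    intro habs
    have hlenpre : (row.take yN).length = yN := by simp; omega
    have hlen := congrArg List.length habs
    simp only [List.length_append, hfillG_length, hlenpre, List.length_drop,
      List.length_replicate] at hlen
    have hdropnil : row.drop yN = [] := by
      rw [List.drop_eq_nil_iff]; omega
    rw [hdropnil, List.append_nil] at habs
    -- heads differ: a carry fill from a non-'?' carry has no '?', replicate is all '?'
    cases hp : row.take yN with
    | nil => rw [hp] at hfmem; simp at hfmem
    | cons a t =>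
      have hyn : yN = t.length + 1 := by
        rw [hp] at hlenpre; simpa using hlenpre.symm
      rw [hp] at habs
      have hmem : (if a = '?' then f else a) ∈ hfillG '?' f (a :: t) := by
        simp only [hfillG]; split <;> simp_all
      have := hfillG_ne_b '?' f (a :: t) hfq _ hmem
      rw [habs] at hmem
      have := List.eq_of_mem_replicate hmem
      split at this <;> simp_all

-- A's fourth loop is the forward carry fill seeded with start_row
theorem carry_foldl {α : Type} [DecidableEq α] (b : α) (M : List α) :
    ∀ (acc : List α) (c : α),
      (M.foldl (fun (acc : List α × α) r =>
        if r = b then (acc.1 ++ [acc.2], acc.2) else (acc.1 ++ [r], r)) (acc, c)).1 =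
      acc ++ hfillG b c M := by
  induction M with
  | nil => simp [hfillG]
  | cons r t ih =>
    intro acc c
    simp only [List.foldl_cons, hfillG]
    by_cases hr : r = b
    · simp [hr, ih]
    · simp [hr, ih]

theorem dropWhile_cons_prop {α : Type} (p : α → Bool) (l : List α) (a : α) (t : List α)
    (h : l.dropWhile p = a :: t) : p a = false := by
  induction l with
  | nil => simp at h
  | cons b l ih =>
    rw [List.dropWhile_cons] at h
    split at h
    · exact ih h
    · next hb =>
      injection h with h1 _
      subst h1
      simpa using hb

theorem core_eq (yN : Nat) (top : List (List Char))
    (hlen : ∀ r ∈ top, yN ≤ r.length)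
    (hex : top = [] ∨ ∃ r ∈ top, r ≠ List.replicate yN '?') :
    (((((top.zip (top.map (fun row =>
        (List.range yN).foldl (fun s j => if row.getD j '?' ≠ '?' ∧ s = '?' then row.getD j '?' else s) '?'))).map
        (fun p => if p.1 = List.replicate yN '?' then (p.1, true)
          else (((List.range yN).foldl (fun (q : List Char × Char) j =>
              if q.1.getD j '?' = '?' then (q.1.set j q.2, q.2) else (q.1, q.1.getD j '?'))
            (p.1, p.2)).1, false))).map Prod.fst).foldl
        (fun (acc : List (List Char) × List Char) r =>
          if r = List.replicate yN '?' then (acc.1 ++ [acc.2], acc.2) else (acc.1 ++ [r], r))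
        ([], match ((top.zip (top.map (fun row =>
            (List.range yN).foldl (fun s j => if row.getD j '?' ≠ '?' ∧ s = '?' then row.getD j '?' else s) '?'))).map
            (fun p => if p.1 = List.replicate yN '?' then (p.1, true)
              else (((List.range yN).foldl (fun (q : List Char × Char) j =>
                  if q.1.getD j '?' = '?' then (q.1.set j q.2, q.2) else (q.1, q.1.getD j '?'))
                (p.1, p.2)).1, false))).find? (fun q => !q.2) with
          | some q => q.1
          | none => ([] : List Char))).1)
    = smearG (List.replicate yN '?') (top.map (fillRow yN)) := by
  rcases hex with htop | ⟨r, hrmem, hrne⟩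
  · subst htop; simp [smearG, hfillG]
  set rep := List.replicate yN '?' with hrep
  -- normalise A's second pass into a per-row map
  have hzip : top.zip (top.map (fun row =>
      (List.range yN).foldl (fun s j => if row.getD j '?' ≠ '?' ∧ s = '?' then row.getD j '?' else s) '?')) =
      top.map (fun r => (r, (List.range yN).foldl
        (fun s j => if r.getD j '?' ≠ '?' ∧ s = '?' then r.getD j '?' else s) '?')) := by
    have h := List.zip_map' (f := @id (List Char)) (g := fun r =>
      (List.range yN).foldl (fun s j => if r.getD j '?' ≠ '?' ∧ s = '?' then r.getD j '?' else s) '?')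
      (l := top)
    simpa using h
  rw [hzip, List.map_map]
  have hstep2 : ∀ rr ∈ top,
      ((fun p => if p.1 = rep then (p.1, true)
          else (((List.range yN).foldl (fun (q : List Char × Char) j =>
              if q.1.getD j '?' = '?' then (q.1.set j q.2, q.2) else (q.1, q.1.getD j '?'))
            (p.1, p.2)).1, false)) ∘ (fun r => (r, (List.range yN).foldl
        (fun s j => if r.getD j '?' ≠ '?' ∧ s = '?' then r.getD j '?' else s) '?'))) rr
      = (fillRow yN rr, decide (rr = rep)) := by
    intro rr hr
    have hry : yN ≤ rr.length := hlen rr hr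
    simp only [Function.comp]
    by_cases hb : rr = rep
    · rw [if_pos hb, hb]
      simp [hrep, fillRow_rep]
    · rw [if_neg hb]
      have hs0 : (List.range yN).foldl
          (fun s j => if rr.getD j '?' ≠ '?' ∧ s = '?' then rr.getD j '?' else s) '?' =
          (match (rr.take yN).find? (fun c => c ≠ '?') with | some f => f | none => '?') := by
        rw [foldl_range_getD (fun s a => if a ≠ '?' ∧ s = '?' then a else s) '?' yN rr '?' hry,
          fg_firstL]
      rw [hs0, A_inner yN rr _ hry]
      simp only [rowA_eq]
      simp [hb]
  rw [List.map_congr_left hstep2]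
  -- decompose top into leading blank rows, the first non-blank row, and the rest
  have hrBne : ¬ ((fun r => decide (r = rep)) r = true) := by simpa using hrne
  have hdwne : top.dropWhile (fun r => decide (r = rep)) ≠ [] := by
    intro h0
    have : top = top.takeWhile (fun r => decide (r = rep)) := by
      conv_lhs => rw [← List.takeWhile_append_dropWhile (p := fun r => decide (r = rep)) (l := top)]
      rw [h0, List.append_nil]
    have h2 : r ∈ List.takeWhile (fun r => decide (r = rep)) top := by
      rw [← this]; exact hrmem
    exact hrBne (List.mem_takeWhile_imp (p := fun r => decide (r = rep)) h2)
  cases hdw : top.dropWhile (fun r => decide (r = rep)) with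
  | nil => exact absurd hdw hdwne
  | cons r0 T =>
  have hr0ne : r0 ≠ rep := by
    have := dropWhile_cons_prop (fun r => decide (r = rep)) top r0 T hdw
    simpa using this
  have hP : ∀ rr ∈ top.takeWhile (fun r => decide (r = rep)), rr = rep := by
    intro rr h
    simpa using List.mem_takeWhile_imp h
  set k := (top.takeWhile (fun r => decide (r = rep))).length with hk
  have htop2 : top = List.replicate k rep ++ r0 :: T := by
    conv_lhs => rw [← List.takeWhile_append_dropWhile (p := fun r => decide (r = rep)) (l := top)]
    rw [hdw, hk, ← List.eq_replicate_of_mem hP]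
  have hr0mem : r0 ∈ top := by rw [htop2]; simp
  have hF0 : fillRow yN r0 ≠ rep := fillRow_ne_rep yN r0 (hlen r0 hr0mem) hr0ne
  -- the first non-blank entry A finds
  have hfind : (top.map (fun rr => (fillRow yN rr, decide (rr = rep)))).find? (fun q => !q.2)
      = some (fillRow yN r0, decide (r0 = rep)) := by
    rw [List.find?_map, htop2]
    rw [List.find?_append]
    have hnone : ((List.replicate k rep).find?
        (((fun q => !q.2) ∘ fun rr => (fillRow yN rr, decide (rr = rep))))) = none := by
      rw [List.find?_eq_none]
      intro a ha
      simp [List.eq_of_mem_replicate ha]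
    rw [hnone, Option.none_or, List.find?_cons_of_pos (by simp [hr0ne])]
    rfl
  rw [hfind]
  have hm2 : (top.map (fun rr => (fillRow yN rr, decide (rr = rep)))).map Prod.fst
      = List.replicate k rep ++ fillRow yN r0 :: T.map (fillRow yN) := by
    rw [List.map_map, htop2]
    simp [hrep, fillRow_rep, Function.comp]
  rw [hm2]
  have hmap : top.map (fillRow yN) = List.replicate k rep ++ fillRow yN r0 :: T.map (fillRow yN) := by
    rw [htop2]; simp [hrep, fillRow_rep]
  rw [hmap]
  set F0 := fillRow yN r0 with hF0d
  set Tm := T.map (fillRow yN) with hTm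
  have hA : ((List.replicate k rep ++ F0 :: Tm).foldl
      (fun (acc : List (List Char) × List Char) r =>
        if r = rep then (acc.1 ++ [acc.2], acc.2) else (acc.1 ++ [r], r)) ([], F0)).1
      = List.replicate k F0 ++ F0 :: hfillG rep F0 Tm := by
    rw [carry_foldl, List.nil_append, hfillG_append, hfillG_rep, lastG_rep]
    simp [hfillG]
  rw [hA, smearG_decomp rep F0 k Tm hF0]

theorem cake_main (matrix : List (List String)) (x : Int) (y : Int)
    (hpre : Pre_cake matrix x y) : cake matrix x y = cake_alt matrix x y := by
  obtain ⟨h1, h2, h3, h4⟩ := hpre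
  have hx : x.toNat ≤ (rowsOf matrix).length := by
    simp only [rowsOf, List.length_map]; omega
  have hlen : ∀ r ∈ (rowsOf matrix).take x.toNat, y.toNat ≤ r.length := h3
  rw [cake_alt_eq matrix x y hx h3]
  simp only [cake]
  refine congrArg _ (congrArg _ (congrArg (fun L => L ++ (rowsOf matrix).drop x.toNat) ?_))
  apply core_eq
  · intro r hr; exact hlen r (by simpa using hr)
  · by_cases hxp : 0 < x
    · exact Or.inr (h4 hxp)
    · left
      rw [Int.toNat_of_nonpos (Int.not_lt.mp hxp)]
      simp

-- ===== VERDICT (by name: the statement is the Claim_ definition above) =====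
theorem cake_spec : Claim_equal_cake := by
  intro matrix x y _ hpre
  exact cake_main matrix x y hpre
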